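-- pv_equiv track=rewrite | github.com/STAINCABLER/DHBW_TIF23_RAG_System | datenbank-tests/Chunking/Chunkingmodell.py | build_full_path
-- ===== SOURCE A (Python) =====
-- def build_full_path(numbering: str) -> str:
--     if '.' not in numbering:
--         return numbering
--     parts = numbering.split('.')
--     path_elements = []
--     for i in range(1, len(parts) + 1):
--         path_elements.append('.'.join(parts[:i]))
--     return ' > '.join(path_elements)
-- ===== SOURCE B (Python) =====
-- def build_full_path(numbering: str) -> str:
--     parts = numbering.split('.')
--     prefix = parts[0]
--     prefixes = [prefix]
--     for part in parts[1:]: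
--         prefix = prefix + '.' + part
--         prefixes.append(prefix)
--     return ' > '.join(prefixes)
-- ===== Notes on version B (the rewrite author's own statement) =====
-- stated objective: simpler
-- what changed: Replaces the re-slice-and-rejoin of parts[:i] at every index (and the dotless-input guard) with a single pass that extends one running prefix string per part, collecting each extension; the dotless case falls out of the same loop.
import Mathlib
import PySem

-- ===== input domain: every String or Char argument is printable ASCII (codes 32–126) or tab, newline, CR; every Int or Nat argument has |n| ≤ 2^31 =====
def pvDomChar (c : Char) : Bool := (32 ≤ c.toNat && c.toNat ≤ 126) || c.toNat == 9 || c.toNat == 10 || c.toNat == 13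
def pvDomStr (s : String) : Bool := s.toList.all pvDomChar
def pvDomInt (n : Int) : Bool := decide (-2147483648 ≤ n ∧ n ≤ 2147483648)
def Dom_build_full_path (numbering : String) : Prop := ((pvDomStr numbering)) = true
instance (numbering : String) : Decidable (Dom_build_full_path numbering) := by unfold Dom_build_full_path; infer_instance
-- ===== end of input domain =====

-- B replaces A's re-slice-and-rejoin of parts[:i] at every index (and A's dotless-input
-- guard) with a single pass extending one running prefix string per part; simpler.

-- ===== PORT A =====
def build_full_path (numbering : String) : String :=
  if PySem.Str.isIn "." numbering = false then numbering
  else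
    let parts := PySem.Chars.splitOn numbering.toList ['.']
    let path_elements := (PySem.List.pyRange 1 (parts.length + 1)).foldl
      (fun acc i => acc ++ [PySem.Chars.join ['.'] (PySem.List.slice parts none (some i))]) []
    String.ofList (PySem.Chars.join [' ', '>', ' '] path_elements)

-- ===== PORT B =====
def build_full_path_alt (numbering : String) : String :=
  let parts := PySem.Chars.splitOn numbering.toList ['.']
  let first := parts.headI    -- parts[0]; exact here: str.split('.') never returns an empty list
  let st := (PySem.List.slice parts (some 1)).foldl
    (fun (st : List (List Char) × List Char) part =>
      let pfx := st.2 ++ '.' :: part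
      (st.1 ++ [pfx], pfx)) ([first], first)
  String.ofList (PySem.Chars.join [' ', '>', ' '] st.1)

-- ===== PRECONDITION & SPEC =====
def Spec_build_full_path (numbering : String) (out : String) : Prop := out = build_full_path_alt numbering
instance (numbering : String) (out : String) : Decidable (Spec_build_full_path numbering out) := by unfold Spec_build_full_path; infer_instance

-- ===== CLAIM (what is proved, stated in full; the proofs are below) =====
def Claim_equal_build_full_path : Prop := ∀ (numbering : String), Dom_build_full_path numbering → Spec_build_full_path numbering (build_full_path numbering)

-- ===== LEMMAS AND PROOFS =====

-- the singleton-pattern infix test is membership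
theorem pv_singleton_infix (a : Char) (l : List Char) : [a] <:+: l ↔ a ∈ l := by
  constructor
  · intro h; exact h.subset (List.mem_singleton_self a)
  · intro h
    obtain ⟨s, t, rfl⟩ := List.append_of_mem h
    exact ⟨s, t, by simp⟩

theorem pv_isIn_dot (cs : List Char) : PySem.Chars.isIn ['.'] cs = true ↔ '.' ∈ cs := by
  unfold PySem.Chars.isIn
  rw [bne_iff_ne, ne_eq, PySem.Chars.find_eq_neg_one_iff, not_not, pv_singleton_infix]

-- splitOn.go on a dot-free remainder just closes the current piece
theorem pv_go_no_dot' : ∀ (fuel : Nat) (l cur : List Char) (acc : List (List Char)),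
    '.' ∉ l → PySem.Chars.splitOn.go ['.'] fuel l cur acc = ((cur.reverse ++ l) :: acc).reverse := by
  intro fuel
  induction fuel with
  | zero => intro l cur acc _; simp [PySem.Chars.splitOn.go]
  | succ n ih =>
    intro l cur acc h
    cases l with
    | nil => simp [PySem.Chars.splitOn.go]
    | cons c rest =>
      have hc : c ≠ '.' := fun hc => h (by simp [hc])
      have hpre : List.isPrefixOf ['.'] (c :: rest) = false := by
        simp [List.isPrefixOf]; exact fun hh => (hc hh.symm).elim
      rw [PySem.Chars.splitOn.go]
      simp only [hpre, if_neg (by simp : ¬ (false = true))]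
      rw [ih rest (c :: cur) acc (fun hm => h (by simp [hm]))]
      simp

theorem pv_splitOn_no_dot (cs : List Char) (h : '.' ∉ cs) :
    PySem.Chars.splitOn cs ['.'] = [cs] := by
  unfold PySem.Chars.splitOn
  rw [pv_go_no_dot' _ _ _ _ h]; simp

theorem pv_go_ne_nil : ∀ (fuel : Nat) (l cur : List Char) (acc : List (List Char)),
    PySem.Chars.splitOn.go ['.'] fuel l cur acc ≠ [] := by
  intro fuel
  induction fuel with
  | zero => intro l cur acc; simp [PySem.Chars.splitOn.go]
  | succ n ih =>
    intro l cur acc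
    cases l with
    | nil => simp [PySem.Chars.splitOn.go]
    | cons c rest =>
      rw [PySem.Chars.splitOn.go]
      by_cases hpre : List.isPrefixOf ['.'] (c :: rest) = true
      · simp only [hpre]; exact ih _ _ _
      · simp only [if_neg hpre]; exact ih _ _ _

theorem pv_splitOn_ne_nil (cs : List Char) : PySem.Chars.splitOn cs ['.'] ≠ [] :=
  pv_go_ne_nil _ _ _ _

-- append-fold is a map
theorem pv_foldl_append_map {ι : Type} (f : ι → List Char) :
    ∀ (l : List ι) (init : List (List Char)),
      l.foldl (fun acc i => acc ++ [f i]) init = init ++ l.map f := by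
  intro l
  induction l with
  | nil => intro init; simp
  | cons x xs ih => intro init; simp [List.foldl_cons, ih]

-- Python's range(1, n + 2) is the integers 1 .. n + 1
theorem pv_pyRange_self (a : Int) : PySem.List.pyRange a a = [] := by
  have h := PySem.List.pyRange_one_append a a a le_rfl le_rfl
  exact (List.self_eq_append_right.mp h)

theorem pv_pyRange_one_succ (n : Nat) :
    PySem.List.pyRange 1 ((n : Int) + 1) = (List.range n).map (fun k : Nat => ((k : Int) + 1)) := by
  induction n with
  | zero => simp [pv_pyRange_self 1]
  | succ m ih =>
    have hsplit := PySem.List.pyRange_one_append 1 ((m : Int) + 1) ((m : Int) + 2)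
      (by omega) (by omega)
    have hlast : PySem.List.pyRange ((m : Int) + 1) ((m : Int) + 2) = [(m : Int) + 1] := by
      rw [PySem.List.pyRange_one_cons (by omega)]
      have h2 : (m : Int) + 1 + 1 = (m : Int) + 2 := by ring
      rw [h2, pv_pyRange_self]
    have hcast : ((m + 1 : Nat) : Int) + 1 = (m : Int) + 2 := by push_cast; ring
    rw [hcast, hsplit, ih, hlast, List.range_succ, List.map_append]
    simp

-- B's running-prefix loop, characterised
def pvPrefixes (pfx : List Char) : List (List Char) → List (List Char)
  | [] => []
  | q :: r => (pfx ++ '.' :: q) :: pvPrefixes (pfx ++ '.' :: q) r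

theorem pv_foldB : ∀ (rest : List (List Char)) (ps : List (List Char)) (pfx : List Char),
    (rest.foldl
      (fun (st : List (List Char) × List Char) part =>
        let p := st.2 ++ '.' :: part
        (st.1 ++ [p], p)) (ps, pfx)).1 = ps ++ pvPrefixes pfx rest := by
  intro rest
  induction rest with
  | nil => intro ps pfx; simp [pvPrefixes]
  | cons q r ih =>
    intro ps pfx
    simp only [List.foldl_cons]
    rw [ih]
    simp [pvPrefixes]

theorem pv_prefixes_shift (r : List (List Char)) (a b : List Char) :
    pvPrefixes (a ++ b) r = (pvPrefixes b r).map (fun x => a ++ x) := by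
  induction r generalizing b with
  | nil => simp [pvPrefixes]
  | cons q r' ih =>
    show (a ++ b ++ '.' :: q) :: pvPrefixes (a ++ b ++ '.' :: q) r' = _
    rw [List.append_assoc a b ('.' :: q)]
    rw [ih (b ++ '.' :: q)]
    simp [pvPrefixes]

-- the running prefixes ARE the joins of the take-prefixes
theorem pv_main (rest : List (List Char)) : ∀ (p : List Char),
    p :: pvPrefixes p rest =
      (List.range (rest.length + 1)).map
        (fun k => PySem.Chars.join ['.'] ((p :: rest).take (k + 1))) := by
  induction rest with
  | nil =>
    intro p
    simp [pvPrefixes, List.range_succ, PySem.Chars.join_singleton]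
  | cons q r ih =>
    intro p
    rw [show (q :: r).length = r.length + 1 from rfl]
    rw [List.range_succ_eq_map, List.map_cons, List.map_map]
    have htail : ((List.range (r.length + 1)).map
        ((fun k => PySem.Chars.join ['.'] ((p :: q :: r).take (k + 1))) ∘ Nat.succ)) =
        ((List.range (r.length + 1)).map
          (fun k => PySem.Chars.join ['.'] ((q :: r).take (k + 1)))).map
            (fun x => (p ++ ['.']) ++ x) := by
      rw [List.map_map]
      apply List.map_congr_left
      intro k _
      show PySem.Chars.join ['.'] ((p :: q :: r).take (k + 1 + 1)) = _
      rw [show (p :: q :: r).take (k + 1 + 1) = p :: q :: r.take k from rfl]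
      rw [PySem.Chars.join_cons_cons]
      show _ = (p ++ ['.']) ++ PySem.Chars.join ['.'] (q :: r.take k)
      simp
    rw [htail, ← ih q]
    show p :: ((p ++ '.' :: q) :: pvPrefixes (p ++ '.' :: q) r) = _
    rw [show p ++ '.' :: q = (p ++ ['.']) ++ q by simp]
    rw [pv_prefixes_shift r (p ++ ['.']) q]
    simp [PySem.Chars.join_singleton]

-- ===== VERDICT (by name: the statement is the Claim_ definition above) =====
theorem build_full_path_spec : Claim_equal_build_full_path := by
  intro numbering _
  unfold Spec_build_full_path build_full_path build_full_path_alt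
  have hdot : (("." : String).toList) = ['.'] := by decide
  by_cases h : '.' ∈ numbering.toList
  · -- dotted case: both sides run over the split-off parts
    have hinc : PySem.Chars.isIn ['.'] numbering.toList = true := (pv_isIn_dot _).mpr h
    rw [if_neg (by simp [PySem.Str.isIn_eq, hdot, hinc])]
    obtain ⟨p, rest, hsplit⟩ :
        ∃ p rest, PySem.Chars.splitOn numbering.toList ['.'] = p :: rest := by
      cases hs : PySem.Chars.splitOn numbering.toList ['.'] with
      | nil => exact absurd hs (pv_splitOn_ne_nil _)
      | cons a b => exact ⟨a, b, rfl⟩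
    rw [hsplit]
    simp only [List.headI]
    rw [PySem.List.slice_from _ (by omega : (0 : Int) ≤ 1)]
    rw [show ((1 : Int)).toNat = 1 from rfl]
    rw [show List.drop 1 (p :: rest) = rest from rfl]
    rw [pv_foldl_append_map, List.nil_append, pv_foldB rest [p] p]
    rw [show (([p] : List (List Char)) ++ pvPrefixes p rest) = p :: pvPrefixes p rest by simp]
    rw [pv_main rest p]
    rw [show (((p :: rest).length : Int) + 1) = (((rest.length + 1 : Nat) : Int) + 1) by
      push_cast; simp]
    rw [pv_pyRange_one_succ, List.map_map]
    apply congrArg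
    apply congrArg
    apply List.map_congr_left
    intro k _
    show PySem.Chars.join ['.'] (PySem.List.slice (p :: rest) none (some ((k : Int) + 1))) = _
    rw [PySem.List.slice_to _ (by omega : (0 : Int) ≤ (k : Int) + 1)]
    rw [show ((k : Int) + 1).toNat = k + 1 by omega]
  · -- dot-free case: A returns the input, B joins the single piece
    have hin : PySem.Str.isIn "." numbering = false := by
      rw [PySem.Str.isIn_eq, hdot]
      cases hb : PySem.Chars.isIn ['.'] numbering.toList with
      | false => rfl
      | true => exact absurd ((pv_isIn_dot _).mp hb) h
    rw [if_pos hin, pv_splitOn_no_dot _ h]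
    simp only [List.headI]
    rw [PySem.List.slice_from _ (by omega : (0 : Int) ≤ 1)]
    rw [show List.drop (1 : Int).toNat [numbering.toList] = ([] : List (List Char)) from rfl]
    simp only [List.foldl_nil]
    rw [PySem.Chars.join_singleton]
    simp
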